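-- pv_equiv track=rewrite | github.com/AndrewZoldy/lecture1 | exercise2.py | sort_cols
-- ===== SOURCE A (Python) =====
-- def sort_cols(table):
--     for ind in range(len(table[0])):
--         minimum = 0
--         minimal_index = ind
--         for i in table:
--             minimum += i[ind]
--         for ind_2 in range(len(table[0]))[ind:]:
--             counter = 0
--             for i in table:
--                 counter += i[ind_2]
--             if counter >= minimum:
--                 continue
--             else:
--                 minimum = counter
--                 minimal_index = ind_2
--         for row_ind in range(len(table)):
--             table[row_ind].insert(ind, table[row_ind].pop(minimal_index))
--             # table_sorted_cols[row_ind].append(table_sorted[row_ind][minimal_index])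
--     return table
-- ===== SOURCE B (Python) =====
-- def sort_cols(table):
--     n = len(table[0])
--     sums = [sum(row[j] for row in table) for j in range(n)]
--     order = sorted(range(n), key=lambda j: (sums[j], j))
--     return [[row[j] for j in order] + row[n:] for row in table]
-- ===== Notes on version B (the rewrite author's own statement) =====
-- stated objective: faster
-- what changed: A does an in-place selection sort of the columns, recomputing every column sum inside a quadratic scan (O(cols^2) sum computations, each O(rows)); B computes each column sum once, stable-sorts the column indices by (sum, index) and rebuilds the rows in one pass.
import Mathlib
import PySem

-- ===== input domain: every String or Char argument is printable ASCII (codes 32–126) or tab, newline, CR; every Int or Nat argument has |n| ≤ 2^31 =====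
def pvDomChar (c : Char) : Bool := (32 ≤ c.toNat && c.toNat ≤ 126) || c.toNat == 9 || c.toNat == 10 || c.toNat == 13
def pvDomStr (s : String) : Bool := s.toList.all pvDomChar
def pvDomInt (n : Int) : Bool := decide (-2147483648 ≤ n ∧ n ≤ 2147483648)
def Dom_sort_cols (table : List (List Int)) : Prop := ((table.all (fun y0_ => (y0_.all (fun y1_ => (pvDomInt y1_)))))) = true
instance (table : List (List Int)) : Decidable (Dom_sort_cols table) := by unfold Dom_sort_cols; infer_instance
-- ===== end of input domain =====

-- ===== PORT A =====
-- Note: Python A sorts `table` in place and returns it; B returns a fresh list.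
-- The equivalence proved here is about the RETURN value.
def sort_cols (table : List (List Int)) : List (List Int) :=
  (PySem.List.pyRange 0 (table.headI.length : Int) 1).foldl (fun t ind =>
    -- minimum = sum of column `ind`; minimal_index = ind
    let minimum : Int := t.foldl (fun acc i => acc + PySem.List.pyGetD i ind 0) 0
    -- for ind_2 in range(len(table[0]))[ind:]: scan for a strictly smaller column sum
    let r : Int × Int :=
      (PySem.List.slice (PySem.List.pyRange 0 (t.headI.length : Int) 1) (some ind) none).foldl
        (fun st ind_2 =>
          let counter : Int := t.foldl (fun acc i => acc + PySem.List.pyGetD i ind_2 0) 0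
          if counter ≥ st.1 then st else (counter, ind_2))
        (minimum, ind)
    -- for row_ind in range(len(table)): table[row_ind].insert(ind, table[row_ind].pop(minimal_index))
    t.map (fun row =>
      match PySem.List.pop? row r.2 with
      | some (v, rest) => PySem.List.insert rest ind v
      | none => row))   -- pop out of range raises in Python; such inputs are outside Pre_
    table

-- ===== PORT B =====
def sort_cols_alt (table : List (List Int)) : List (List Int) :=
  let n : Int := (table.headI.length : Int)
  let sums : List Int :=
    (PySem.List.pyRange 0 n 1).map
      (fun j => table.foldl (fun acc row => acc + PySem.List.pyGetD row j 0) 0)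
  -- sorted(range(n), key=lambda j: (sums[j], j)) — Python tuple comparison is lexicographic,
  -- which is exactly the Lex order on ℤ ×ₗ ℤ
  let order : List Int :=
    PySem.List.sorted (PySem.List.pyRange 0 n 1)
      (fun j => (toLex (PySem.List.pyGetD sums j 0, j) : Lex (Int × Int)))
  table.map (fun row =>
    order.map (fun j => PySem.List.pyGetD row j 0) ++ PySem.List.slice row (some n) none)

-- ===== PRECONDITION & SPEC =====
-- Pre_ excludes exactly the inputs on which Python A raises IndexError: the empty table
-- (len(table[0])) and tables with a row shorter than the first row (i[ind]).
def Pre_sort_cols (table : List (List Int)) : Prop :=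
  table ≠ [] ∧ ∀ row ∈ table, table.headI.length ≤ row.length
instance (table : List (List Int)) : Decidable (Pre_sort_cols table) := by
  unfold Pre_sort_cols; infer_instance
def pvWitness_sort_cols : List (List Int) := [[3, 1], [0, 2]]

def Spec_sort_cols (table : List (List Int)) (out : List (List Int)) : Prop := out = sort_cols_alt table
instance (table : List (List Int)) (out : List (List Int)) : Decidable (Spec_sort_cols table out) := by unfold Spec_sort_cols; infer_instance

-- ===== CLAIM (what is proved, stated in full; the proofs are below) =====
def Claim_equal_sort_cols : Prop := ∀ (table : List (List Int)), Dom_sort_cols table → Pre_sort_cols table → Spec_sort_cols table (sort_cols table)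

-- ===== LEMMAS AND PROOFS =====

-- S T j = sum of column j of T (the column sums both programs compare)
def pvS (T : List (List Int)) (j : Int) : Int :=
  T.foldl (fun acc row => acc + PySem.List.pyGetD row j 0) 0

-- app n ord row = the row rebuilt by picking columns ord (tail beyond n untouched)
def pvApp (n : Nat) (ord : List Int) (row : List Int) : List Int :=
  ord.map (fun j => PySem.List.pyGetD row j 0) ++ row.drop n

-- the lexicographic (column sum, column index) strict order
def pvLex (T : List (List Int)) (a b : Int) : Prop :=
  pvS T a < pvS T b ∨ (pvS T a = pvS T b ∧ a < b)

-- move the element at position mi to position ind (ind ≤ mi): pop + insert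
def pvMove (ind mi : Nat) (ord : List Int) : List Int :=
  ord.take ind ++ ord.getD mi 0 :: ((ord.eraseIdx mi).drop ind)

-- the body of A's outer loop, verbatim
def pvAstep (t : List (List Int)) (ind : Int) : List (List Int) :=
  let minimum : Int := t.foldl (fun acc i => acc + PySem.List.pyGetD i ind 0) 0
  let r : Int × Int :=
    (PySem.List.slice (PySem.List.pyRange 0 (t.headI.length : Int) 1) (some ind) none).foldl
      (fun st ind_2 =>
        let counter : Int := t.foldl (fun acc i => acc + PySem.List.pyGetD i ind_2 0) 0
        if counter ≥ st.1 then st else (counter, ind_2))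
      (minimum, ind)
  t.map (fun row =>
    match PySem.List.pop? row r.2 with
    | some (v, rest) => PySem.List.insert rest ind v
    | none => row)

lemma pvAstep_sort_cols (table : List (List Int)) :
    sort_cols table = (PySem.List.pyRange 0 (table.headI.length : Int) 1).foldl pvAstep table := rfl

-- reading a rebuilt row at a position inside ord is reading the original row at ord's entry
lemma pv_colget (row ord : List Int) (n : Nat) (i : Int) (h0 : 0 ≤ i) (h : i.toNat < ord.length) :
    PySem.List.pyGetD (pvApp n ord row) i 0 = PySem.List.pyGetD row (ord.getD i.toNat 0) 0 := by
  have hml : (ord.map (fun j => PySem.List.pyGetD row j 0)).length = ord.length := List.length_map ..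
  have hl : i < ((pvApp n ord row).length : Int) := by
    simp only [pvApp, List.length_append, hml]
    omega
  rw [PySem.List.pyGetD_eq_getElem _ 0 h0 hl]
  rw [show (pvApp n ord row)[i.toNat]'(by exact_mod_cast (by omega : (i.toNat : Int) < ((pvApp n ord row).length : Int)))
        = (ord.map (fun j => PySem.List.pyGetD row j 0))[i.toNat]'(by rw [hml]; exact h) from
      List.getElem_append_left (by rw [hml]; exact h)]
  rw [List.getElem_map, List.getD_eq_getElem ord 0 h]

-- the column sum A computes on the rebuilt table is the original column sum at ord's entry
lemma pv_colsum (T : List (List Int)) (n : Nat) (ord : List Int) (i : Int)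
    (h0 : 0 ≤ i) (h : i.toNat < ord.length) :
    (T.map (pvApp n ord)).foldl (fun acc r => acc + PySem.List.pyGetD r i 0) 0
      = pvS T (ord.getD i.toNat 0) := by
  rw [List.foldl_map]
  unfold pvS
  congr 1
  funext acc r
  rw [pv_colget r ord n i h0 h]

-- per-row pop/insert on a rebuilt row is pvMove on ord
lemma pv_rowop (row ord : List Int) (n : Nat) (ind mi : Nat)
    (hlen : ord.length = n) (him : ind ≤ mi) (hmn : mi < n) :
    (match PySem.List.pop? (pvApp n ord row) (mi : Int) with
     | some (v, rest) => PySem.List.insert rest (ind : Int) v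
     | none => pvApp n ord row)
      = pvApp n (pvMove ind mi ord) row := by
  simp only [pvApp, pvMove]
  have hml : (ord.map (fun j => PySem.List.pyGetD row j 0)).length = ord.length := List.length_map ..
  have hmi : mi < (ord.map (fun j => PySem.List.pyGetD row j 0) ++ row.drop n).length := by
    simp only [List.length_append, hml]; omega
  simp only [PySem.List.pop?_natCast _ mi hmi]
  have hget : (ord.map (fun j => PySem.List.pyGetD row j 0) ++ row.drop n)[mi]'hmi
      = PySem.List.pyGetD row (ord.getD mi 0) 0 := by
    rw [show (ord.map (fun j => PySem.List.pyGetD row j 0) ++ row.drop n)[mi]'hmi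
          = (ord.map (fun j => PySem.List.pyGetD row j 0))[mi]'(by rw [hml]; omega) from
        List.getElem_append_left (by rw [hml]; omega)]
    rw [List.getElem_map, List.getD_eq_getElem ord 0 (by omega)]
  have herase : (ord.map (fun j => PySem.List.pyGetD row j 0) ++ row.drop n).eraseIdx mi
      = (ord.eraseIdx mi).map (fun j => PySem.List.pyGetD row j 0) ++ row.drop n := by
    rw [List.eraseIdx_append_of_lt_length (by rw [hml]; omega), List.eraseIdx_map]
  have hlenE : ((ord.eraseIdx mi).map (fun j => PySem.List.pyGetD row j 0)).length = n - 1 := by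
    rw [List.length_map, List.length_eraseIdx_of_lt (by omega)]
    omega
  have hle : ind ≤ ((ord.map (fun j => PySem.List.pyGetD row j 0) ++ row.drop n).eraseIdx mi).length := by
    rw [herase, List.length_append, hlenE]; omega
  rw [PySem.List.insert_natCast _ ind _ hle, hget, herase]
  rw [List.take_append, List.drop_append, hlenE]
  rw [show ind - (n - 1) = 0 from by omega]
  simp only [List.take_zero, List.drop_zero, List.append_nil]
  rw [List.map_append, ← List.map_take, ← List.map_drop,
      List.take_eraseIdx_eq_take_of_le ord ind mi him]
  simp

-- the inner scan is a first-strict-minimum fold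
lemma pv_minFold (K : Int → Int) (L : List Int) :
    ∀ (a : Int), L.Pairwise (· < ·) → (∀ j ∈ L, a ≤ j) →
    ∃ mi : Int,
      (L.foldl (fun st j => if K j ≥ st.1 then st else (K j, j)) (K a, a)) = (K mi, mi) ∧
      (mi = a ∨ mi ∈ L) ∧ (K mi < K a ∨ mi = a) ∧
      (∀ j ∈ L, K mi < K j ∨ (K mi = K j ∧ mi ≤ j)) := by
  induction L with
  | nil => intro a _ _; exact ⟨a, rfl, Or.inl rfl, Or.inr rfl, by simp⟩
  | cons j L ih =>
    intro a hL ha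
    have hja : a ≤ j := ha j (by simp)
    have hjL : ∀ x ∈ L, j < x := by
      intro x hx; exact (List.pairwise_cons.mp hL).1 x hx
    have hL' : L.Pairwise (· < ·) := (List.pairwise_cons.mp hL).2
    by_cases hc : K j ≥ K a
    · have hstep : (if K j ≥ K a then ((K a, a) : Int × Int) else (K j, j)) = (K a, a) := if_pos hc
      obtain ⟨mi, h1, h2, h3, h4⟩ := ih a hL' (fun x hx => le_of_lt (lt_of_le_of_lt hja (hjL x hx)))
      refine ⟨mi, ?_, ?_, h3, ?_⟩
      · simpa [List.foldl_cons, hstep] using h1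
      · rcases h2 with h | h
        · exact Or.inl h
        · exact Or.inr (List.mem_cons_of_mem _ h)
      · intro x hx
        rcases List.mem_cons.mp hx with rfl | hx'
        · rcases h3 with h | he
          · exact Or.inl (lt_of_lt_of_le h hc)
          · have hax : K a ≤ K x := hc
            rw [he]
            rcases lt_or_eq_of_le hax with h | h
            · exact Or.inl h
            · exact Or.inr ⟨h, hja⟩
        · exact h4 x hx'
    · have hstep : (if K j ≥ K a then ((K a, a) : Int × Int) else (K j, j)) = (K j, j) := if_neg hc
      obtain ⟨mi, h1, h2, h3, h4⟩ := ih j hL' (fun x hx => le_of_lt (hjL x hx))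
      have hKmi : K mi ≤ K j := by
        rcases h3 with h | rfl
        · exact le_of_lt h
        · exact le_refl _
      refine ⟨mi, ?_, ?_, ?_, ?_⟩
      · simpa [List.foldl_cons, hstep] using h1
      · rcases h2 with rfl | h
        · exact Or.inr (by simp)
        · exact Or.inr (List.mem_cons_of_mem _ h)
      · exact Or.inl (lt_of_le_of_lt hKmi (not_le.mp hc))
      · intro x hx
        rcases List.mem_cons.mp hx with rfl | hx'
        · rcases h3 with h | rfl
          · exact Or.inl h
          · exact Or.inr ⟨rfl, le_refl _⟩
        · exact h4 x hx'

-- structure of pvMove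
lemma pv_move_perm (ord : List Int) (ind mi : Nat) (him : ind ≤ mi) (hmn : mi < ord.length) :
    (pvMove ind mi ord).Perm ord := by
  unfold pvMove
  have hE : ord.eraseIdx mi = ord.take mi ++ ord.drop (mi + 1) := List.eraseIdx_eq_take_drop_succ ..
  have htk : (ord.eraseIdx mi).take ind = ord.take ind := List.take_eraseIdx_eq_take_of_le ord ind mi him
  rw [← htk]
  refine List.Perm.trans List.perm_middle ?_
  rw [List.take_append_drop, hE]
  refine List.Perm.trans List.perm_middle.symm ?_
  rw [List.getD_eq_getElem ord 0 hmn, ← List.drop_eq_getElem_cons hmn, List.take_append_drop]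

lemma pv_move_take (ord : List Int) (ind mi : Nat) (him : ind ≤ mi) (hmn : mi < ord.length) :
    (pvMove ind mi ord).take (ind + 1) = ord.take ind ++ [ord.getD mi 0] := by
  unfold pvMove
  have hlt : (ord.take ind).length = ind := List.length_take_of_le (by omega)
  rw [List.take_append, hlt, List.take_of_length_le (by rw [hlt]; omega),
      show ind + 1 - ind = 1 from by omega]
  rfl

lemma pv_move_drop (ord : List Int) (ind mi : Nat) (him : ind ≤ mi) (hmn : mi < ord.length) :
    (pvMove ind mi ord).drop (ind + 1) = (ord.eraseIdx mi).drop ind := by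
  unfold pvMove
  have hlt : (ord.take ind).length = ind := List.length_take_of_le (by omega)
  rw [List.drop_append, hlt, List.drop_of_length_le (by rw [hlt]; omega),
      show ind + 1 - ind = 1 from by omega]
  rfl

lemma pv_erase_drop_sublist (ord : List Int) (ind mi : Nat) (him : ind ≤ mi) (hmn : mi < ord.length) :
    ((ord.eraseIdx mi).drop ind).Sublist (ord.drop ind) := by
  have hE : ord.eraseIdx mi = ord.take mi ++ ord.drop (mi + 1) := List.eraseIdx_eq_take_drop_succ ..
  have hlt : (ord.take mi).length = mi := List.length_take_of_le (by omega)
  have h1 : (ord.eraseIdx mi).drop ind = (ord.take mi).drop ind ++ ord.drop (mi + 1) := by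
    rw [hE, List.drop_append, hlt, show ind - mi = 0 from by omega, List.drop_zero]
  have h2 : ord.drop ind = (ord.take mi).drop ind ++ ord.drop mi := by
    conv_lhs => rw [← List.take_append_drop mi ord]
    rw [List.drop_append, hlt, show ind - mi = 0 from by omega, List.drop_zero]
  rw [h1, h2, List.drop_eq_getElem_cons hmn]
  exact List.Sublist.append_left (List.sublist_cons_self ..) _

-- A's outer loop, by induction on the remaining columns
lemma pv_outer (T : List (List Int)) (r0 : List Int) (rs : List (List Int)) (hT : T = r0 :: rs)
    (n : Nat) (h0 : r0.length = n) (k : Nat) :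
    ∀ (ind : Nat), ind + k = n → ∀ (ord : List Int),
      ord.Perm (PySem.List.pyRange 0 (n : Int) 1) →
      ((ord.drop ind).Pairwise (· < ·)) →
      ((ord.take ind).Pairwise (pvLex T)) →
      (∀ a ∈ ord.take ind, ∀ b ∈ ord.drop ind, pvLex T a b) →
      ∃ ord', (PySem.List.pyRange (ind : Int) (n : Int) 1).foldl pvAstep (T.map (pvApp n ord))
                = T.map (pvApp n ord')
        ∧ ord'.Perm (PySem.List.pyRange 0 (n : Int) 1) ∧ ord'.Pairwise (pvLex T) := by
  subst hT
  induction k with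
  | zero =>
    intro ind hik ord hperm hsuf hpre hcross
    refine ⟨ord, ?_, hperm, ?_⟩
    · rw [PySem.List.pyRange_one_eq_nil (by omega : (n : Int) ≤ (ind : Int))]
      rfl
    · have hlen : ord.length = n := by
        have := hperm.length_eq
        rwa [PySem.List.length_pyRange_one, show ((n : Int) - 0).toNat = n from by omega] at this
      have ht : ord.take ind = ord := List.take_of_length_le (by omega)
      rw [← ht]; exact hpre
  | succ k ih =>
    intro ind hik ord hperm hsuf hpre hcross
    have hindn : ind < n := by omega
    have hlen : ord.length = n := by
      have := hperm.length_eq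
      rwa [PySem.List.length_pyRange_one, show ((n : Int) - 0).toNat = n from by omega] at this
    set T := (r0 :: rs : List (List Int)) with hTdef
    set t := T.map (pvApp n ord) with htdef
    have hhead : (t.headI.length : Int) = (n : Int) := by
      rw [htdef, hTdef]
      simp only [List.map_cons, List.headI, pvApp, List.length_append, List.length_map,
        List.length_drop, h0, hlen]
      omega
    have hslice : PySem.List.slice (PySem.List.pyRange 0 (n : Int) 1) (some (ind : Int)) none
        = PySem.List.pyRange (ind : Int) (n : Int) 1 := by
      rw [PySem.List.slice_from_natCast,
        PySem.List.pyRange_one_append 0 (ind : Int) (n : Int) (by omega) (by exact_mod_cast hindn.le)]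
      have hl1 : (PySem.List.pyRange 0 (ind : Int) 1).length = ind := by
        rw [PySem.List.length_pyRange_one]; omega
      rw [List.drop_left' hl1]
    set K : Int → Int := fun j => t.foldl (fun acc i => acc + PySem.List.pyGetD i j 0) 0 with hKdef
    have hKval : ∀ p : Nat, p < n → K (p : Int) = pvS T (ord.getD p 0) := by
      intro p hp
      rw [hKdef]
      have := pv_colsum T n ord (p : Int) (by omega) (by simp only [Int.toNat_natCast]; omega)
      simpa using this
    obtain ⟨miI, hfold, hmemI, _, hall⟩ :=
      pv_minFold K (PySem.List.pyRange (ind : Int) (n : Int) 1) (ind : Int)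
        (PySem.List.pairwise_lt_pyRange_one ..)
        (fun j hj => (PySem.List.mem_pyRange_one.mp hj).1)
    have hmiI : (ind : Int) ≤ miI ∧ miI < (n : Int) := by
      rcases hmemI with rfl | h
      · exact ⟨le_refl _, by exact_mod_cast hindn⟩
      · exact PySem.List.mem_pyRange_one.mp h
    set mi : Nat := miI.toNat with hmidef
    have hmiEq : miI = (mi : Int) := (Int.toNat_of_nonneg (by omega)).symm
    have him : ind ≤ mi := by omega
    have hmn : mi < n := by omega
    set m : Int := ord.getD mi 0 with hmdef
    -- the position form of the minimality fact
    have hpos : ∀ p : Nat, ind ≤ p → p < n → pvLex T m (ord.getD p 0) ∨ p = mi := by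
      intro p hp1 hp2
      have hjmem : ((p : Int)) ∈ PySem.List.pyRange (ind : Int) (n : Int) 1 :=
        PySem.List.mem_pyRange_one.mpr ⟨by omega, by omega⟩
      have hKm : K miI = pvS T m := by rw [hmiEq, hKval mi hmn]
      have hKp : K (p : Int) = pvS T (ord.getD p 0) := hKval p hp2
      rcases hall _ hjmem with h | ⟨heq, hle⟩
      · left; left; rw [← hKm, ← hKp]; exact h
      · by_cases hpm : p = mi
        · right; exact hpm
        · left; right
          constructor
          · rw [← hKm, ← hKp]; exact heq
          · -- mi < p and the suffix of ord is strictly increasing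
            have hmp : mi < p := by omega
            have hg := List.pairwise_iff_getElem.mp hsuf (mi - ind) (p - ind)
              (by rw [List.length_drop]; omega) (by rw [List.length_drop]; omega) (by omega)
            have e1 : (ord.drop ind)[mi - ind]'(by rw [List.length_drop]; omega) = m := by
              rw [List.getElem_drop, hmdef, List.getD_eq_getElem ord 0 (by omega)]
              congr 1; omega
            have e2 : (ord.drop ind)[p - ind]'(by rw [List.length_drop]; omega) = ord.getD p 0 := by
              rw [List.getElem_drop, List.getD_eq_getElem ord 0 (by omega)]
              congr 1; omega
            rw [e1, e2] at hg
            exact hg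
    -- minimality against the members of the remaining suffix
    have hminb : ∀ b ∈ (ord.eraseIdx mi).drop ind, pvLex T m b := by
      intro b hb
      have hE : ord.eraseIdx mi = ord.take mi ++ ord.drop (mi + 1) := List.eraseIdx_eq_take_drop_succ ..
      have hlt : (ord.take mi).length = mi := List.length_take_of_le (by omega)
      have h1 : (ord.eraseIdx mi).drop ind = (ord.take mi).drop ind ++ ord.drop (mi + 1) := by
        rw [hE, List.drop_append, hlt, show ind - mi = 0 from by omega, List.drop_zero]
      rw [h1, List.mem_append] at hb
      rcases hb with hb | hb
      · obtain ⟨q, hq, hbq⟩ := List.mem_iff_getElem.mp hb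
        have hq' : q < mi - ind := by
          rw [List.length_drop, hlt] at hq; omega
        have : b = ord.getD (ind + q) 0 := by
          rw [← hbq, List.getElem_drop, List.getElem_take, List.getD_eq_getElem ord 0 (by omega)]
        rcases hpos (ind + q) (by omega) (by omega) with h | h
        · rw [this]; exact h
        · omega
      · obtain ⟨q, hq, hbq⟩ := List.mem_iff_getElem.mp hb
        have hq' : q < n - (mi + 1) := by
          rw [List.length_drop] at hq; omega
        have : b = ord.getD (mi + 1 + q) 0 := by
          rw [← hbq, List.getElem_drop, List.getD_eq_getElem ord 0 (by omega)]
        rcases hpos (mi + 1 + q) (by omega) (by omega) with h | h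
        · rw [this]; exact h
        · omega
    have hm_mem : m ∈ ord.drop ind := by
      have e1 : (ord.drop ind)[mi - ind]'(by rw [List.length_drop]; omega) = m := by
        rw [List.getElem_drop, hmdef, List.getD_eq_getElem ord 0 (by omega)]
        congr 1; omega
      exact e1 ▸ List.getElem_mem _
    -- one iteration of the outer loop
    have hstep : pvAstep t (ind : Int) = T.map (pvApp n (pvMove ind mi ord)) := by
      unfold pvAstep
      simp only [hhead, hslice]
      rw [hfold]
      rw [hmiEq, htdef, List.map_map]
      exact congrArg (fun f => List.map f T)
        (funext fun row => pv_rowop row ord n ind mi hlen him hmn)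
    -- invariants for the moved order
    have hperm' : (pvMove ind mi ord).Perm (PySem.List.pyRange 0 (n : Int) 1) :=
      (pv_move_perm ord ind mi him (by omega)).trans hperm
    have hsuf' : ((pvMove ind mi ord).drop (ind + 1)).Pairwise (· < ·) := by
      rw [pv_move_drop ord ind mi him (by omega)]
      exact hsuf.sublist (pv_erase_drop_sublist ord ind mi him (by omega))
    have hpre' : ((pvMove ind mi ord).take (ind + 1)).Pairwise (pvLex T) := by
      rw [pv_move_take ord ind mi him (by omega)]
      rw [List.pairwise_append]
      exact ⟨hpre, List.pairwise_singleton .., fun a ha b hb => by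
        rw [List.mem_singleton.mp hb]; exact hcross a ha m hm_mem⟩
    have hcross' : ∀ a ∈ (pvMove ind mi ord).take (ind + 1),
        ∀ b ∈ (pvMove ind mi ord).drop (ind + 1), pvLex T a b := by
      rw [pv_move_take ord ind mi him (by omega), pv_move_drop ord ind mi him (by omega)]
      intro a ha b hb
      rcases List.mem_append.mp ha with ha' | ha'
      · exact hcross a ha' b ((pv_erase_drop_sublist ord ind mi him (by omega)).subset hb)
      · rw [List.mem_singleton.mp ha']; exact hminb b hb
    obtain ⟨ord', hres, hperm'', hlex''⟩ := ih (ind + 1) (by omega) (pvMove ind mi ord)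
      hperm' hsuf' hpre' hcross'
    refine ⟨ord', ?_, hperm'', hlex''⟩
    rw [PySem.List.pyRange_one_cons (by exact_mod_cast hindn : (ind : Int) < (n : Int)),
      List.foldl_cons, hstep]
    rw [show ((ind : Int) + 1) = ((ind + 1 : Nat) : Int) from by push_cast; ring]
    exact hres

-- a row rebuilt with the identity order is the row itself
lemma pv_app_id (row : List Int) (n : Nat) (h : n ≤ row.length) :
    pvApp n (PySem.List.pyRange 0 (n : Int) 1) row = row := by
  unfold pvApp
  have hmap : (PySem.List.pyRange 0 (n : Int) 1).map (fun j => PySem.List.pyGetD row j 0)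
      = row.take n := by
    apply List.ext_getElem
    · rw [List.length_map, PySem.List.length_pyRange_one, List.length_take]
      omega
    · intro k hk1 hk2
      rw [List.getElem_map, PySem.List.getElem_pyRange_one]
      have hkn : k < n := by
        have := hk1
        rw [List.length_map, PySem.List.length_pyRange_one] at this
        omega
      rw [show (0 : Int) + (k : Int) = ((k : Nat) : Int) from by omega,
          PySem.List.pyGetD_natCast, List.getElem_take, List.getD_eq_getElem row 0 (by omega)]
  rw [hmap, List.take_append_drop]

-- ===== VERDICT (by name: the statement is the Claim_ definition above) =====
theorem sort_cols_spec : Claim_equal_sort_cols := by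
  intro table hdom hpre
  unfold Spec_sort_cols
  obtain ⟨hne, hrows⟩ := hpre
  obtain ⟨r0, rs, rfl⟩ : ∃ r0 rs, table = r0 :: rs := by
    cases table with
    | nil => exact absurd rfl hne
    | cons a l => exact ⟨a, l, rfl⟩
  have hrows' : ∀ row ∈ (r0 :: rs : List (List Int)), r0.length ≤ row.length := hrows
  have happ : (r0 :: rs : List (List Int)).map
      (pvApp r0.length (PySem.List.pyRange 0 (r0.length : Int) 1)) = r0 :: rs := by
    rw [List.map_congr_left (fun row hrow => pv_app_id row r0.length (hrows' row hrow))]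
    exact List.map_id _
  obtain ⟨ord', hres, hperm', hlex'⟩ :=
    pv_outer (r0 :: rs) r0 rs rfl r0.length rfl r0.length 0 (by omega)
      (PySem.List.pyRange 0 (r0.length : Int) 1)
      (List.Perm.refl _)
      (by simpa using PySem.List.pairwise_lt_pyRange_one ..)
      (by simp)
      (by simp)
  simp only [Nat.cast_zero] at hres
  have hA : sort_cols (r0 :: rs) = (r0 :: rs).map (pvApp r0.length ord') := by
    rw [pvAstep_sort_cols]
    calc (PySem.List.pyRange 0 (((r0 :: rs : List (List Int)).headI.length : Int)) 1).foldl
          pvAstep (r0 :: rs)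
        = (PySem.List.pyRange 0 ((r0.length : Int)) 1).foldl pvAstep
            ((r0 :: rs).map (pvApp r0.length (PySem.List.pyRange 0 (r0.length : Int) 1))) := by
          rw [happ]
          rfl
      _ = (r0 :: rs).map (pvApp r0.length ord') := hres
  have horder : PySem.List.sorted (PySem.List.pyRange 0 ((r0.length : Int)) 1)
      (fun j => (toLex (PySem.List.pyGetD
          ((PySem.List.pyRange 0 ((r0.length : Int)) 1).map
            (fun j => (r0 :: rs).foldl (fun acc row => acc + PySem.List.pyGetD row j 0) 0)) j 0,
          j) : Lex (Int × Int))) = ord' := by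
    apply PySem.List.sorted_eq_of_perm_of_pairwise_lt _ _ _ hperm'
    refine List.Pairwise.imp_of_mem ?_ hlex'
    intro a b ha hb hr
    have haR := PySem.List.mem_pyRange_one.mp (hperm'.subset ha)
    have hbR := PySem.List.mem_pyRange_one.mp (hperm'.subset hb)
    rw [PySem.List.pyGetD_map_pyRange_of_nonneg _ _ _ _ (by omega) (by omega),
        PySem.List.pyGetD_map_pyRange_of_nonneg _ _ _ _ (by omega) (by omega)]
    exact Prod.Lex.toLex_lt_toLex.mpr hr
  have hB : sort_cols_alt (r0 :: rs) = (r0 :: rs).map (pvApp r0.length ord') := by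
    simp only [sort_cols_alt, List.headI_cons]
    rw [horder]
    refine List.map_congr_left fun row _ => ?_
    rw [PySem.List.slice_from_natCast]
    rfl
  rw [hA, hB]
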